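-- pv_equiv track=rewrite | github.com/dandersonw/slb | nlp.py | _total_token_lens
-- ===== SOURCE A (Python) =====
-- def _total_token_lens(doc, illegal_at):
--     lens = [0] * len(doc)
--     commitment = 0
--     for i in range(len(doc) - 1, -1, -1):
--         t_len = len(doc[i])
--         commitment += t_len
--         lens[i] = commitment
--         if not illegal_at[i]:
--             commitment = 0
--     return lens
-- ===== SOURCE B (Python) =====
-- def _total_token_lens(doc, illegal_at):
--     n = len(doc)
--     cuts = [0] + [i for i in range(1, n) if not illegal_at[i]] + [n]
--     lens = []
--     for a, b in zip(cuts, cuts[1:]):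
--         rem = sum(len(t) for t in doc[a:b])
--         for t in doc[a:b]:
--             lens.append(rem)
--             rem -= len(t)
--     return lens
-- ===== Notes on version B (the rewrite author's own statement) =====
-- stated objective: alternative
-- what changed: Replaces the single backward loop with a running reset accumulator by a forward segmentation pass (cut immediately before every legal position) followed by a per-segment forward fill that writes the segment total and subtracts each token length, instead of accumulating backwards.
import Mathlib
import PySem

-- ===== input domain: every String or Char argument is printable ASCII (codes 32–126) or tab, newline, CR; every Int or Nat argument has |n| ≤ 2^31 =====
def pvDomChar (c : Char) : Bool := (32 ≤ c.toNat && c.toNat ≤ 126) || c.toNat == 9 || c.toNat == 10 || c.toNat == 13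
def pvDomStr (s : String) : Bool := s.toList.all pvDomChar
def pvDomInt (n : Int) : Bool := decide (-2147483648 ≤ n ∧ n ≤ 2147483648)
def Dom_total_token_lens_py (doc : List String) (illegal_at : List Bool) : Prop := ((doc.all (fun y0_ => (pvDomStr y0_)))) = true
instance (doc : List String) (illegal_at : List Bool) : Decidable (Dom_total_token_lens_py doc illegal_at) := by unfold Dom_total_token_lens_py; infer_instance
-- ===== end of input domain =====

-- B replaces A's backward loop with a reset accumulator by a forward segmentation
-- (cut before every legal position) plus a per-segment forward fill; same cost, different decomposition.

-- B replaces A's backward running-sum loop (reset at legal positions) by a forward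
-- segmentation (cut before every legal position) plus a per-segment forward fill; alternative decomposition, same cost.

-- ===== PORT A =====
def total_token_lens_py (doc : List String) (illegal_at : List Bool) : List Int :=
  -- lens = [0] * len(doc); commitment = 0
  -- for i in range(len(doc) - 1, -1, -1): … (illegal_at[i] and lens[i] are in range under Pre_)
  (((PySem.List.pyRange ((PySem.List.len doc) - 1) (-1) (-1)).foldl
    (fun (st : List Int × Int) i =>
      let t_len := PySem.Str.len (PySem.List.pyGetD doc i "")
      let commitment := st.2 + t_len
      let lens := PySem.List.pySetD st.1 i commitment
      let commitment := if !(PySem.List.pyGetD illegal_at i false)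
                        then 0 else commitment
      (lens, commitment))
    (List.replicate doc.length 0, 0))).1

-- ===== PORT B =====
def total_token_lens_py_alt (doc : List String) (illegal_at : List Bool) : List Int :=
  let n := PySem.List.len doc
  -- cuts = [0] + [i for i in range(1, n) if not illegal_at[i]] + [n]
  let cuts : List Int :=
    [0] ++ (PySem.List.pyRange 1 n 1).filter
             (fun i => !(PySem.List.pyGetD illegal_at i false)) ++ [n]
  -- for a, b in zip(cuts, cuts[1:]): rem = sum(...); for t in doc[a:b]: append rem; rem -= len(t)
  (cuts.zip cuts.tail).foldl
    (fun (lens : List Int) ab =>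
      let seg := PySem.List.slice doc (some ab.1) (some ab.2)
      let rem := (seg.map PySem.Str.len).sum
      ((seg.foldl (fun (st : List Int × Int) t =>
          (st.1 ++ [st.2], st.2 - PySem.Str.len t)) (lens, rem))).1)
    []

-- ===== PRECONDITION & SPEC =====
-- A reads illegal_at[i] for every i < len(doc), so it raises IndexError exactly when
-- illegal_at is shorter than doc; those inputs are excluded, nothing else is.
def Pre_total_token_lens_py (doc : List String) (illegal_at : List Bool) : Prop :=
  doc.length ≤ illegal_at.length
instance (doc : List String) (illegal_at : List Bool) : Decidable (Pre_total_token_lens_py doc illegal_at) := by unfold Pre_total_token_lens_py; infer_instance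
def pvWitness_total_token_lens_py : List String × List Bool := (["ab", "c", ""], [true, false, true])

def Spec_total_token_lens_py (doc : List String) (illegal_at : List Bool) (out : List Int) : Prop := out = total_token_lens_py_alt doc illegal_at
instance (doc : List String) (illegal_at : List Bool) (out : List Int) : Decidable (Spec_total_token_lens_py doc illegal_at out) := by unfold Spec_total_token_lens_py; infer_instance

-- ===== CLAIM (what is proved, stated in full; the proofs are below) =====
def Claim_equal_total_token_lens_py : Prop := ∀ (doc : List String) (illegal_at : List Bool), Dom_total_token_lens_py doc illegal_at → Pre_total_token_lens_py doc illegal_at → Spec_total_token_lens_py doc illegal_at (total_token_lens_py doc illegal_at)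
-- ===== LEMMAS AND PROOFS =====

-- Reference function: right fold over the zipped (token, flag) list carrying
-- (commitment, output) — the common semantics both ports are reduced to.
def ttlGo : List (String × Bool) → Int × List Int
  | [] => (0, [])
  | (t, b) :: rest =>
    let r := ttlGo rest
    let c := r.1 + PySem.Str.len t
    (if b then c else 0, c :: r.2)

-- Per-segment forward fill of B as a function.
def seglens (rem : Int) : List String → List Int
  | [] => []
  | t :: ts => rem :: seglens (rem - PySem.Str.len t) ts

-- A's loop body as a named function (definitionally the lambda in the port).
def aStep (doc : List String) (ill : List Bool) (st : List Int × Int) (i : Int) : List Int × Int :=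
  let t_len := PySem.Str.len (PySem.List.pyGetD doc i "")
  let commitment := st.2 + t_len
  let lens := PySem.List.pySetD st.1 i commitment
  let commitment := if !(PySem.List.pyGetD ill i false)
                    then 0 else commitment
  (lens, commitment)

theorem set_append_len (l1 : List Int) (x c : Int) (l2 : List Int) :
    (l1 ++ x :: l2).set l1.length c = l1 ++ c :: l2 := by
  induction l1 with
  | nil => rfl
  | cons y t ih => simp [ih]

theorem set_append_len' (l1 : List Int) (x c : Int) (l2 : List Int) (k : Nat)
    (hk : l1.length = k) : (l1 ++ x :: l2).set k c = l1 ++ c :: l2 := by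
  subst hk; exact set_append_len l1 x c l2

theorem seglens_eq_foldl (seg : List String) : ∀ (lens : List Int) (rem : Int),
    ((seg.foldl (fun (st : List Int × Int) t =>
        (st.1 ++ [st.2], st.2 - PySem.Str.len t)) (lens, rem))).1
      = lens ++ seglens rem seg := by
  induction seg with
  | nil => intro lens rem; simp [seglens]
  | cons t ts ih =>
    intro lens rem
    simp only [List.foldl_cons, seglens]
    rw [ih]
    simp

theorem ttlGo_seg (s rest : List (String × Bool))
    (hs : ∀ p ∈ s.tail, p.2 = true) (hr : (ttlGo rest).1 = 0) :
    ttlGo (s ++ rest)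
      = ((match s with
          | [] => 0
          | (_, b) :: _ => if b then (s.map (fun p => PySem.Str.len p.1)).sum else 0),
         seglens ((s.map (fun p => PySem.Str.len p.1)).sum) (s.map Prod.fst) ++ (ttlGo rest).2) := by
  induction s with
  | nil =>
    simp only [List.nil_append, List.map_nil, seglens]
    exact Prod.ext hr rfl
  | cons p s' ih =>
    obtain ⟨t, b⟩ := p
    have hs1 : ∀ q ∈ s', q.2 = true := by simpa using hs
    have ihx := ih (fun q hq => hs1 q (List.mem_of_mem_tail hq))
    show ttlGo ((t, b) :: (s' ++ rest)) = _
    simp only [ttlGo, ihx]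
    cases s' with
    | nil => simp [seglens]
    | cons q s'' =>
      obtain ⟨t', b'⟩ := q
      have hb' : b' = true := hs1 (t', b') (by simp)
      subst hb'
      simp only [if_true, List.map_cons, List.sum_cons, seglens, List.cons_append]
      ring_nf

theorem ttlGo_snd_seg (s rest : List (String × Bool))
    (hs : ∀ p ∈ s.tail, p.2 = true) (hr : (ttlGo rest).1 = 0) :
    (ttlGo (s ++ rest)).2
      = seglens ((s.map (fun p => PySem.Str.len p.1)).sum) (s.map Prod.fst) ++ (ttlGo rest).2 := by
  rw [ttlGo_seg s rest hs hr]

theorem segs_eq (doc : List String) (ill : List Bool) (h : doc.length ≤ ill.length) :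
    ∀ (cs : List Nat) (a : Nat),
      (a :: cs).Pairwise (· < ·) →
      (a :: cs).getLast? = some doc.length →
      (∀ c ∈ cs, c = doc.length ∨ (c < doc.length ∧ ill.getD c false = false)) →
      (∀ j, a < j → j < doc.length → j ∉ cs → ill.getD j false = true) →
      ((a :: cs).zip cs).flatMap
        (fun ab => seglens ((((doc.drop ab.1).take (ab.2 - ab.1)).map PySem.Str.len).sum)
                           ((doc.drop ab.1).take (ab.2 - ab.1)))
        = (ttlGo ((doc.drop a).zip (ill.drop a))).2 := by
  intro cs
  induction cs with
  | nil =>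
    intro a _ hlast _ _
    have ha : a = doc.length := by simpa using hlast
    subst ha
    simp [List.drop_length, ttlGo]
  | cons b cs' ih =>
    intro a hpw hlast hleg hint
    have hab : a < b := (List.pairwise_cons.mp hpw).1 b (by simp)
    have hbleg : b = doc.length ∨ (b < doc.length ∧ ill.getD b false = false) :=
      hleg b (by simp)
    have hbn : b ≤ doc.length := by rcases hbleg with h1 | h1 <;> omega
    have hpw' : (b :: cs').Pairwise (· < ·) := (List.pairwise_cons.mp hpw).2
    have hbcs' : ∀ c ∈ cs', b < c := (List.pairwise_cons.mp hpw').1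
    -- IH at b
    have hIH := ih b hpw'
      (by rwa [List.getLast?_cons_cons] at hlast)
      (fun c hc => hleg c (by simp [hc]))
      (by
        intro j hbj hjn hjcs'
        refine hint j (by omega) hjn ?_
        simp only [List.mem_cons, not_or]
        exact ⟨by omega, hjcs'⟩)
    -- abbreviations
    set z := (doc.drop a).zip (ill.drop a) with hz
    have hsplit : z = z.take (b - a) ++ z.drop (b - a) := (List.take_append_drop _ _).symm
    have hdropz : z.drop (b - a) = (doc.drop b).zip (ill.drop b) := by
      rw [hz, List.zip_eq_zipWith, List.drop_zipWith, List.drop_drop, List.drop_drop,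
        ← List.zip_eq_zipWith]
      congr 2 <;> omega
    have htakez : z.take (b - a)
        = ((doc.drop a).take (b - a)).zip ((ill.drop a).take (b - a)) := by
      rw [hz, List.zip_eq_zipWith, List.take_zipWith, ← List.zip_eq_zipWith]
    have hlen1 : ((doc.drop a).take (b - a)).length = b - a := by
      simp [List.length_take, List.length_drop]; omega
    have hfst : (z.take (b - a)).map Prod.fst = (doc.drop a).take (b - a) := by
      rw [htakez, List.map_fst_zip]
      simp [List.length_take, List.length_drop]; omega
    -- elements of the tail of the segment are illegal
    have hs : ∀ p ∈ (z.take (b - a)).tail, p.2 = true := by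
      intro p hp
      obtain ⟨k, hk, hpk⟩ := List.mem_iff_getElem.mp hp
      have hkl : k + 1 < (z.take (b - a)).length := by
        have h1 : (z.take (b - a)).tail.length = (z.take (b - a)).length - 1 :=
          List.length_tail
        omega
      have hget : (z.take (b - a)).tail[k] = (z.take (b - a))[k + 1] := by
        rw [List.getElem_tail]
      have hzl : (z.take (b - a)).length = b - a := by
        rw [htakez]
        simp [List.length_zip, List.length_take, List.length_drop]
        omega
      have hkb : k + 1 < b - a := by omega
      have hjn : a + (k + 1) < doc.length := by omega
      have hq : (z.take (b - a))[k + 1]'hkl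
          = (doc[a + (k + 1)]'(by omega), ill[a + (k + 1)]'(by omega)) := by
        simp [hz, List.getElem_take, List.getElem_zip, List.getElem_drop]
      have hp2 : p.2 = ill[a + (k + 1)]'(by omega) := by
        rw [← hpk, hget, hq]
      have := hint (a + (k + 1)) (by omega) hjn
        (by
          simp only [List.mem_cons, not_or]
          constructor
          · omega
          · intro hmem; have := hbcs' _ hmem; omega)
      rw [hp2]
      rw [List.getD_eq_getElem?_getD] at this
      rw [List.getElem?_eq_getElem (by omega)] at this
      simpa using this
    -- zero carry out of the rest
    have hr : (ttlGo ((doc.drop b).zip (ill.drop b))).1 = 0 := by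
      rcases hbleg with rfl | ⟨hblt, hbfalse⟩
      · simp [List.drop_length, ttlGo]
      · have hdoc : doc.drop b = doc[b] :: doc.drop (b + 1) := List.drop_eq_getElem_cons hblt
        have hill : ill.drop b = ill[b]'(by omega) :: ill.drop (b + 1) :=
          List.drop_eq_getElem_cons (by omega)
        have hbf : ill[b]'(by omega) = false := by
          rw [List.getD_eq_getElem?_getD, List.getElem?_eq_getElem (by omega)] at hbfalse
          simpa using hbfalse
        rw [hdoc, hill, List.zip_cons_cons]
        simp [ttlGo, hbf]
    -- put it together
    rw [List.zip_cons_cons, List.flatMap_cons, hIH, ← hdropz, hsplit]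
    rw [ttlGo_snd_seg (z.take (b - a)) (z.drop (b - a)) hs (by rw [hdropz]; exact hr)]
    rw [hfst]
    have hmaplen : (z.take (b - a)).map (fun p => PySem.Str.len p.1)
        = ((doc.drop a).take (b - a)).map PySem.Str.len := by
      rw [← hfst, List.map_map]; rfl
    rw [hmaplen]
    congr 1
    rw [← hsplit, hdropz]

def natSegf (doc : List String) (ab : Nat × Nat) : List Int :=
  seglens ((((doc.drop ab.1).take (ab.2 - ab.1)).map PySem.Str.len).sum)
          ((doc.drop ab.1).take (ab.2 - ab.1))

def natCuts (doc : List String) (ill : List Bool) : List Nat :=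
  ((List.range (doc.length - 1)).map (fun k => 1 + k)).filter
    (fun j => !ill.getD j false) ++ [doc.length]

theorem b_flatMap (doc : List String) (ill : List Bool) :
    total_token_lens_py_alt doc ill
      = ((0 :: natCuts doc ill).zip (natCuts doc ill)).flatMap (natSegf doc) := by
  unfold total_token_lens_py_alt
  simp only []
  have hcuts :
      ([0] ++ (PySem.List.pyRange 1 (PySem.List.len doc) 1).filter
          (fun i => !(PySem.List.pyGetD ill i false)) ++ [PySem.List.len doc] : List Int)
      = (0 :: natCuts doc ill).map (Nat.cast) := by
    rw [PySem.List.pyRange_one]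
    have h1 : ((PySem.List.len doc : Int) - 1).toNat = doc.length - 1 := by
      simp [PySem.List.len_eq]
    rw [h1]
    have h2 : (fun k : Nat => (1 : Int) + (k : Int)) = (Nat.cast ∘ (fun k : Nat => 1 + k)) := by
      funext k; simp
    have h3 : (List.range (doc.length - 1)).map (fun k : Nat => (1 : Int) + (k : Int))
        = ((List.range (doc.length - 1)).map (fun k : Nat => 1 + k)).map (Nat.cast) := by
      rw [List.map_map, h2]
    rw [h3, List.filter_map]
    have h4 : ((fun i : Int => !(PySem.List.pyGetD ill i false)) ∘ (Nat.cast : Nat → Int))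
        = (fun j : Nat => !ill.getD j false) := by
      funext j; simp [Function.comp, PySem.List.pyGetD_natCast]
    rw [h4]
    simp [natCuts, PySem.List.len_eq]
  rw [hcuts]
  have htail : ((0 :: natCuts doc ill).map (Nat.cast : Nat → Int)).tail
      = (natCuts doc ill).map (Nat.cast) := by
    simp
  rw [htail]
  have hzip : ((0 :: natCuts doc ill).map (Nat.cast : Nat → Int)).zip
        ((natCuts doc ill).map (Nat.cast : Nat → Int))
      = ((0 :: natCuts doc ill).zip (natCuts doc ill)).map
          (Prod.map (Nat.cast) (Nat.cast)) := by
    rw [List.zip_map]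
  rw [hzip]
  -- fold with append = flatMap
  have hstep :
      (List.map (Prod.map (Nat.cast : Nat → Int) (Nat.cast : Nat → Int))
          ((0 :: natCuts doc ill).zip (natCuts doc ill))).foldl
        (fun (lens : List Int) (ab : Int × Int) =>
          ((PySem.List.slice doc (some ab.1) (some ab.2)).foldl
              (fun (st : List Int × Int) t => (st.1 ++ [st.2], st.2 - PySem.Str.len t))
              (lens, ((PySem.List.slice doc (some ab.1) (some ab.2)).map PySem.Str.len).sum)).1)
        []
      = (List.map (Prod.map (Nat.cast : Nat → Int) (Nat.cast : Nat → Int))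
          ((0 :: natCuts doc ill).zip (natCuts doc ill))).foldl
        (fun (lens : List Int) (ab : Int × Int) =>
          lens ++ seglens (((PySem.List.slice doc (some ab.1) (some ab.2)).map PySem.Str.len).sum)
                          (PySem.List.slice doc (some ab.1) (some ab.2)))
        [] := by
    apply PySem.List.foldl_congr_mem
    intro acc x _
    exact seglens_eq_foldl _ _ _
  rw [hstep]
  rw [PySem.List.foldl_append_eq_flatMap]
  rw [List.flatMap_map]
  simp only [List.nil_append]
  congr 1
  funext ab
  obtain ⟨a, b⟩ := ab
  simp only [Prod.map, natSegf]
  rw [PySem.List.slice_natCast]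

theorem a_loop_inv (doc : List String) (ill : List Bool) (h : doc.length ≤ ill.length) :
    ∀ (m : Nat) (k : Nat), k + m = doc.length → ∀ (lens0 : List Int), lens0.length = doc.length →
    ((PySem.List.pyRange (k : Int) (doc.length : Int) 1).foldr
      (fun i st => aStep doc ill st i) (lens0, 0))
    = (lens0.take k ++ (ttlGo ((doc.drop k).zip (ill.drop k))).2,
       (ttlGo ((doc.drop k).zip (ill.drop k))).1) := by
  intro m
  induction m with
  | zero =>
    intro k hk lens0 hlen
    have hk' : k = doc.length := by omega
    subst hk'
    rw [PySem.List.pyRange_one_eq_nil (by omega)]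
    simp [List.drop_length, ttlGo, List.take_of_length_le, hlen.le]
  | succ m ih =>
    intro k hk lens0 hlen
    have hkn : k < doc.length := by omega
    rw [PySem.List.pyRange_one_cons (by exact_mod_cast hkn), List.foldr_cons]
    have hcast : ((k : Int) + 1) = ((k + 1 : Nat) : Int) := by push_cast; ring
    rw [hcast, ih (k + 1) (by omega) lens0 hlen]
    -- unfold the reference on the dropped lists
    have hdoc : doc.drop k = doc[k] :: doc.drop (k + 1) := List.drop_eq_getElem_cons hkn
    have hill : ill.drop k = ill[k]'(by omega) :: ill.drop (k + 1) :=
      List.drop_eq_getElem_cons (by omega)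
    rw [hdoc, hill, List.zip_cons_cons]
    -- compute the step
    show aStep doc ill _ (k : Int) = _
    unfold aStep
    have hgetdoc : PySem.List.pyGetD doc (k : Int) "" = doc[k] := by
      simp [PySem.List.pyGetD_natCast, List.getD_eq_getElem?_getD, List.getElem?_eq_getElem hkn]
    have hgetill : PySem.List.pyGetD ill (k : Int) false = ill[k]'(by omega) := by
      simp [PySem.List.pyGetD_natCast, List.getD_eq_getElem?_getD,
        List.getElem?_eq_getElem (show k < ill.length by omega)]
    have htake : lens0.take (k + 1) = lens0.take k ++ [lens0[k]'(by omega)] := by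
      rw [List.take_add_one, List.getElem?_eq_getElem (by omega)]
      rfl
    have hlen2 : (lens0.take k).length = k := by simp; omega
    rw [hgetdoc, hgetill]
    simp only [PySem.List.pySetD_natCast, ttlGo]
    rw [htake, List.append_assoc, List.singleton_append,
      set_append_len' _ _ _ _ k hlen2]
    by_cases hb : ill[k]'(by omega) = true <;> simp [hb]

theorem a_eq_ref (doc : List String) (ill : List Bool) (h : doc.length ≤ ill.length) :
    total_token_lens_py doc ill = (ttlGo (doc.zip ill)).2 := by
  have hport : total_token_lens_py doc ill
      = (((PySem.List.pyRange ((PySem.List.len doc) - 1) (-1) (-1)).foldl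
          (aStep doc ill) (List.replicate doc.length 0, 0))).1 := rfl
  rw [hport]
  have hrange : PySem.List.pyRange ((PySem.List.len doc) - 1) (-1) (-1)
      = (PySem.List.pyRange 0 (doc.length : Int) 1).reverse := by
    rw [PySem.List.pyRange_neg_one_eq_reverse]
    norm_num
  rw [hrange, List.foldl_reverse]
  have := a_loop_inv doc ill h doc.length 0 (by omega) (List.replicate doc.length 0) (by simp)
  rw [show ((0 : Nat) : Int) = (0 : Int) from rfl] at this
  rw [this]
  simp

theorem b_eq_ref (doc : List String) (ill : List Bool) (h : doc.length ≤ ill.length) :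
    total_token_lens_py_alt doc ill = (ttlGo (doc.zip ill)).2 := by
  rw [b_flatMap]
  rcases doc with _ | ⟨d, ds⟩
  · simp [natCuts, natSegf, seglens, ttlGo]
  · set doc := d :: ds with hdoc
    have hn : 0 < doc.length := by simp [hdoc]
    set n := doc.length with hnd
    set flt := ((List.range (n - 1)).map (fun k => 1 + k)).filter
        (fun j => !ill.getD j false) with hflt
    have hmemflt : ∀ j ∈ flt, (1 ≤ j ∧ j < n) ∧ ill.getD j false = false := by
      intro j hj
      rw [hflt, List.mem_filter] at hj
      obtain ⟨hj1, hj2⟩ := hj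
      simp only [List.mem_map, List.mem_range] at hj1
      obtain ⟨k, hk, rfl⟩ := hj1
      refine ⟨⟨by omega, by omega⟩, by simpa using hj2⟩
    have hpwflt : flt.Pairwise (· < ·) := by
      exact ((List.pairwise_map).mpr
        ((List.pairwise_lt_range).imp (fun h => by omega))).sublist List.filter_sublist
    have hpw : (0 :: natCuts doc ill).Pairwise (· < ·) := by
      rw [natCuts, ← hflt, ← hnd]
      rw [List.pairwise_cons]
      constructor
      · intro x hx
        rcases List.mem_append.mp hx with hx | hx
        · exact Nat.lt_of_lt_of_le Nat.zero_lt_one (hmemflt x hx).1.1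
        · simp at hx; omega
      · rw [List.pairwise_append]
        refine ⟨hpwflt, by simp, ?_⟩
        intro x hx y hy
        simp at hy
        subst hy
        exact (hmemflt x hx).1.2
    have hlast : (0 :: natCuts doc ill).getLast? = some doc.length := by
      rw [natCuts]
      rw [show (0 : Nat) :: (((List.range (doc.length - 1)).map (fun k => 1 + k)).filter
            (fun j => !ill.getD j false) ++ [doc.length])
          = ((0 : Nat) :: ((List.range (doc.length - 1)).map (fun k => 1 + k)).filter
            (fun j => !ill.getD j false)) ++ [doc.length] from by simp]
      exact List.getLast?_concat
    have hleg : ∀ c ∈ natCuts doc ill, c = doc.length ∨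
        (c < doc.length ∧ ill.getD c false = false) := by
      intro c hc
      rw [natCuts] at hc
      rcases List.mem_append.mp hc with hc | hc
      · right
        rw [← hnd] at *
        exact ⟨(hmemflt c (by rwa [hflt])).1.2, (hmemflt c (by rwa [hflt])).2⟩
      · left; simpa using hc
    have hint : ∀ j, 0 < j → j < doc.length → j ∉ natCuts doc ill →
        ill.getD j false = true := by
      intro j hj0 hjn hj
      rw [natCuts] at hj
      simp only [List.mem_append, not_or] at hj
      obtain ⟨hj1, _⟩ := hj
      by_contra hfalse
      apply hj1
      rw [List.mem_filter]
      constructor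
      · simp only [List.mem_map, List.mem_range]
        exact ⟨j - 1, by omega, by omega⟩
      · simp only [Bool.not_eq_true] at hfalse
        simpa [List.getD_eq_getElem?_getD] using hfalse
    have := segs_eq doc ill h (natCuts doc ill) 0 hpw hlast hleg hint
    simp only [List.drop_zero] at this
    exact this

-- ===== VERDICT (by name: the statement is the Claim_ definition above) =====
theorem total_token_lens_py_spec : Claim_equal_total_token_lens_py := by
  intro doc ill _ hpre
  unfold Pre_total_token_lens_py at hpre
  unfold Spec_total_token_lens_py
  rw [a_eq_ref doc ill hpre, b_eq_ref doc ill hpre]
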